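-- pv_equiv track=rewrite | github.com/UdeS-CoBIUS/SpliceFamAlignMulti | src_cba/utils_reduce.py | compute_segment_matches
-- ===== SOURCE A (Python) =====
-- def compute_segment_matches(sequence1, sequence2, block_ss, block_qs, block_identity):
--     segment_matches = []
--     i1 = 0
--     i2 = 0
--     s1 = -1
--     s2 = -1
--     e1 = -1
--     e2 = -1
--     for i in range(len(sequence1)):
--         if (sequence1[i] != '-' and sequence2[i] != '-'):
--             if(s1 == -1):
--                 s1 = i1
--                 s2 = i2
--             i1 += 1
--             i2 += 1
--             if(i == len(sequence1) - 1):
--                 e1 = i1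
--                 e2 = i2
--                 segment_matches.append([s1+block_ss,s2+block_qs,e1-s1, block_identity])
--         else:
--             if(s1 != -1):
--                 e1 = i1
--                 e2 = i2
--                 segment_matches.append([s1+block_ss,s2+block_qs,e1-s1, block_identity])
--                 s1 = -1
--                 s2 = -1
--                 e1 = -1
--                 e2 = -1
--             if(sequence1[i] != '-'):
--                 i1 += 1
--             if(sequence2[i] != '-'):
--                 i2 += 1
--     return segment_matches
-- ===== SOURCE B (Python) =====
-- def compute_segment_matches(sequence1, sequence2, block_ss, block_qs, block_identity):
--     # Run-based scan: locate each maximal run of positions where both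
--     # sequences are ungapped, emit one block per run.
--     n = len(sequence1)
--     out = []
--     i = 0
--     i1 = 0
--     i2 = 0
--     while i < n:
--         if sequence1[i] != '-' and sequence2[i] != '-':
--             j = i
--             while j < n and sequence1[j] != '-' and sequence2[j] != '-':
--                 j += 1
--             out.append([i1 + block_ss, i2 + block_qs, j - i, block_identity])
--             i1 += j - i
--             i2 += j - i
--             i = j
--         else:
--             if sequence1[i] != '-':
--                 i1 += 1
--             if sequence2[i] != '-':
--                 i2 += 1
--             i += 1
--     return out
-- ===== Notes on version B (the rewrite author's own statement) =====
-- stated objective: alternative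
-- what changed: A's per-position state machine with -1 sentinels (s1/s2/e1/e2) and a special last-index emit is replaced by a run-based scan: each maximal run of both-ungapped positions is located with an inner scan and emitted as one block.
import Mathlib
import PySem

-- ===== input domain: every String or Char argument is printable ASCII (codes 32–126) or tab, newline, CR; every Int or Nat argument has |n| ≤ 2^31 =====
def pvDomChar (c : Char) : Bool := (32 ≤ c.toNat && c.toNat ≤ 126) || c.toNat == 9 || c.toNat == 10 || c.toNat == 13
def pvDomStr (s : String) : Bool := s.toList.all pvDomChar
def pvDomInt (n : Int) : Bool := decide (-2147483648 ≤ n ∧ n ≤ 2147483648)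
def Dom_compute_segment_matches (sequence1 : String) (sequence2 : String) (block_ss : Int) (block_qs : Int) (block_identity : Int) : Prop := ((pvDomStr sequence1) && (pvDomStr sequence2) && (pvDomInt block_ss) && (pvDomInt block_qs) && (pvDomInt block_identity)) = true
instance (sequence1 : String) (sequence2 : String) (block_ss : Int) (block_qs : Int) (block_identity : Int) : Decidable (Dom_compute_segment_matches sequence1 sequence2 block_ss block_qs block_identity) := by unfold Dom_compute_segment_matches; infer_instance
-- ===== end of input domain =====

-- B replaces A's -1-sentinel state machine by a run-based scan (find each maximal
-- both-ungapped run, emit one block per run); alternative decomposition, same O(n) cost.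

-- ===== PORT A =====
-- A's per-position loop: state (i1,i2,s1,s2,acc); the Python pair (sequence1[i], sequence2[i])
-- is the i-th element of the zipped list (under Pre_, len(sequence2) ≥ len(sequence1), the zip
-- has exactly len(sequence1) pairs, so this is exact).
def pvALoop (bss bqs bid : Int) : List (Char × Char) → Int → Int → Int → Int → List (List Int) → List (List Int)
  | [], _, _, _, _, acc => acc
  | (c1, c2) :: rest, i1, i2, s1, s2, acc =>
    if (c1 != '-') && (c2 != '-') then
      let s1' := if s1 == -1 then i1 else s1
      let s2' := if s1 == -1 then i2 else s2
      -- `i == len(sequence1) - 1` ⇔ no positions remain after this one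
      if rest.isEmpty then
        acc ++ [[s1' + bss, s2' + bqs, (i1 + 1) - s1', bid]]
      else
        pvALoop bss bqs bid rest (i1 + 1) (i2 + 1) s1' s2' acc
    else
      let acc' := if s1 != -1 then acc ++ [[s1 + bss, s2 + bqs, i1 - s1, bid]] else acc
      pvALoop bss bqs bid rest (if c1 != '-' then i1 + 1 else i1)
        (if c2 != '-' then i2 + 1 else i2) (-1) (-1) acc'

def compute_segment_matches (sequence1 : String) (sequence2 : String) (block_ss : Int) (block_qs : Int) (block_identity : Int) : List (List Int) :=
  pvALoop block_ss block_qs block_identity (sequence1.toList.zip sequence2.toList) 0 0 (-1) (-1) []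

-- ===== PORT B =====
def pvMatch (q : Char × Char) : Bool := (q.1 != '-') && (q.2 != '-')

-- B's outer while loop; the inner `while j < n and …` scan for the run end is the
-- takeWhile of the remaining positions.
def pvBLoop (bss bqs bid : Int) : List (Char × Char) → Int → Int → List (List Int)
  | [], _, _ => []
  | (c1, c2) :: rest, i1, i2 =>
    if (c1 != '-') && (c2 != '-') then
      let run := List.takeWhile pvMatch ((c1, c2) :: rest)
      let L : Int := run.length
      [i1 + bss, i2 + bqs, L, bid] :: pvBLoop bss bqs bid (((c1, c2) :: rest).drop run.length) (i1 + L) (i2 + L)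
    else
      pvBLoop bss bqs bid rest (if c1 != '-' then i1 + 1 else i1) (if c2 != '-' then i2 + 1 else i2)
termination_by ps _ _ => ps.length
decreasing_by
  · simp only [List.length_drop]
    have h1 : 0 < (List.takeWhile pvMatch ((c1, c2) :: rest)).length := by
      simp [List.takeWhile, pvMatch, *]
    simp only [List.length_cons]
    omega
  · simp

def compute_segment_matches_alt (sequence1 : String) (sequence2 : String) (block_ss : Int) (block_qs : Int) (block_identity : Int) : List (List Int) :=
  pvBLoop block_ss block_qs block_identity (sequence1.toList.zip sequence2.toList) 0 0

-- ===== PRECONDITION & SPEC =====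
-- Python A raises IndexError (access sequence2[i]) exactly when len(sequence2) < len(sequence1).
def Pre_compute_segment_matches (sequence1 : String) (sequence2 : String) (block_ss : Int) (block_qs : Int) (block_identity : Int) : Prop :=
  sequence1.length ≤ sequence2.length
instance (sequence1 : String) (sequence2 : String) (block_ss : Int) (block_qs : Int) (block_identity : Int) : Decidable (Pre_compute_segment_matches sequence1 sequence2 block_ss block_qs block_identity) := by unfold Pre_compute_segment_matches; infer_instance

def pvWitness_compute_segment_matches : String × String × Int × Int × Int := ("ab-c", "a-bc", 3, 5, 90)

def Spec_compute_segment_matches (sequence1 : String) (sequence2 : String) (block_ss : Int) (block_qs : Int) (block_identity : Int) (out : List (List Int)) : Prop := out = compute_segment_matches_alt sequence1 sequence2 block_ss block_qs block_identity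
instance (sequence1 : String) (sequence2 : String) (block_ss : Int) (block_qs : Int) (block_identity : Int) (out : List (List Int)) : Decidable (Spec_compute_segment_matches sequence1 sequence2 block_ss block_qs block_identity out) := by unfold Spec_compute_segment_matches; infer_instance

-- ===== CLAIM (what is proved, stated in full; the proofs are below) =====
def Claim_equal_compute_segment_matches : Prop := ∀ (sequence1 : String) (sequence2 : String) (block_ss : Int) (block_qs : Int) (block_identity : Int), Dom_compute_segment_matches sequence1 sequence2 block_ss block_qs block_identity → Pre_compute_segment_matches sequence1 sequence2 block_ss block_qs block_identity → Spec_compute_segment_matches sequence1 sequence2 block_ss block_qs block_identity (compute_segment_matches sequence1 sequence2 block_ss block_qs block_identity)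

-- ===== LEMMAS AND PROOFS =====

-- "run ended (or input ended)" continuation of A's loop, used to characterise an active run.
def pvAFin (bss bqs bid : Int) : List (Char × Char) → Int → Int → Int → Int → List (List Int) → List (List Int)
  | [], i1, _, s1, s2, acc => acc ++ [[s1 + bss, s2 + bqs, i1 - s1, bid]]
  | q :: rest, i1, i2, s1, s2, acc =>
      pvALoop bss bqs bid rest (if q.1 != '-' then i1 + 1 else i1)
        (if q.2 != '-' then i2 + 1 else i2) (-1) (-1)
        (acc ++ [[s1 + bss, s2 + bqs, i1 - s1, bid]])

theorem pvALoop_active (bss bqs bid : Int) :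
    ∀ (ps : List (Char × Char)) (i1 i2 s1 s2 : Int) (acc : List (List Int)),
      ps ≠ [] → s1 ≠ -1 →
      pvALoop bss bqs bid ps i1 i2 s1 s2 acc =
        pvAFin bss bqs bid (ps.dropWhile pvMatch)
          (i1 + ((ps.takeWhile pvMatch).length : Int))
          (i2 + ((ps.takeWhile pvMatch).length : Int)) s1 s2 acc := by
  intro ps
  induction ps with
  | nil => intro _ _ _ _ _ h _; exact absurd rfl h
  | cons q rest ih =>
    intro i1 i2 s1 s2 acc _ hs1
    obtain ⟨c1, c2⟩ := q
    by_cases hm : ((c1 != '-') && (c2 != '-')) = true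
    · have hsif : (s1 == -1) = false := by
        simp only [beq_eq_false_iff_ne]; exact hs1
      rcases rest with _ | ⟨q', rest'⟩
      · simp [pvALoop, pvAFin, hm, hsif, List.takeWhile, List.dropWhile, pvMatch]
      · have hne : (q' :: rest') ≠ ([] : List (Char × Char)) := by simp
        rw [pvALoop]
        simp only [hm, if_true, hsif, if_false, List.isEmpty_cons, Bool.false_eq_true,
          if_false]
        rw [ih (i1 + 1) (i2 + 1) s1 s2 acc hne hs1]
        have ht : List.takeWhile pvMatch ((c1, c2) :: q' :: rest')
            = (c1, c2) :: List.takeWhile pvMatch (q' :: rest') := by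
          simp [List.takeWhile, pvMatch, hm]
        have hd : List.dropWhile pvMatch ((c1, c2) :: q' :: rest')
            = List.dropWhile pvMatch (q' :: rest') := by
          simp [List.dropWhile, pvMatch, hm]
        rw [ht, hd]
        congr 1 <;> · simp; ring
    · have hs1' : (s1 != -1) = true := by simp only [bne_iff_ne]; exact hs1
      rw [pvALoop]
      simp only [hm, Bool.false_eq_true, if_false, hs1', if_true]
      have ht : List.takeWhile pvMatch ((c1, c2) :: rest) = [] := by
        simp [List.takeWhile, pvMatch, hm]
      have hd : List.dropWhile pvMatch ((c1, c2) :: rest) = (c1, c2) :: rest := by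
        simp [List.dropWhile, pvMatch, hm]
      rw [ht, hd]
      simp [pvAFin]

theorem pvDropWhile_head_false {α : Type} (p : α → Bool) (l : List α) (q : α) (t : List α)
    (h : l.dropWhile p = q :: t) : p q = false := by
  induction l with
  | nil => simp [List.dropWhile] at h
  | cons a l ih =>
    by_cases hp : p a = true
    · exact ih (by simpa [List.dropWhile, hp] using h)
    · have h2 : a :: l = q :: t := by simpa [List.dropWhile, hp] using h
      injection h2 with h3 _
      rw [← h3]
      simpa using hp

theorem pvDropWhile_eq_drop {α : Type} (p : α → Bool) (l : List α) :
    l.dropWhile p = l.drop (l.takeWhile p).length := by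
  induction l with
  | nil => rfl
  | cons a l ih =>
    by_cases hp : p a = true
    · simp [List.dropWhile, List.takeWhile, hp, ih]
    · simp [List.dropWhile, List.takeWhile, hp]

theorem pvMain (bss bqs bid : Int) :
    ∀ (n : Nat) (ps : List (Char × Char)), ps.length ≤ n →
    ∀ (i1 i2 : Int) (acc : List (List Int)), 0 ≤ i1 →
      pvALoop bss bqs bid ps i1 i2 (-1) (-1) acc = acc ++ pvBLoop bss bqs bid ps i1 i2 := by
  intro n
  induction n with
  | zero =>
    intro ps hps i1 i2 acc _
    have : ps = [] := List.length_eq_zero_iff.mp (Nat.le_zero.mp hps)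
    subst this; simp [pvALoop, pvBLoop]
  | succ n ih =>
    intro ps hps i1 i2 acc hi1
    rcases ps with _ | ⟨⟨c1, c2⟩, rest⟩
    · simp [pvALoop, pvBLoop]
    · by_cases hm : ((c1 != '-') && (c2 != '-')) = true
      · have hi1ne : i1 ≠ -1 := by omega
        rcases rest with _ | ⟨q', rest'⟩
        · rw [pvALoop, pvBLoop]
          simp [hm, List.takeWhile, pvMatch, pvBLoop]
        · rw [pvALoop]
          simp only [hm, if_true, List.isEmpty_cons, Bool.false_eq_true, if_false,
            beq_self_eq_true, if_true]
          rw [pvALoop_active bss bqs bid (q' :: rest') (i1 + 1) (i2 + 1) i1 i2 acc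
            (by simp) hi1ne]
          rw [pvBLoop]
          simp only [hm, if_true]
          have ht : List.takeWhile pvMatch ((c1, c2) :: q' :: rest')
              = (c1, c2) :: List.takeWhile pvMatch (q' :: rest') := by
            simp [List.takeWhile, pvMatch, hm]
          set k := (List.takeWhile pvMatch (q' :: rest')).length with hk
          have hrunlen : (List.takeWhile pvMatch ((c1, c2) :: q' :: rest')).length = k + 1 := by
            rw [ht]; simp [hk]
          have hdrop : ((c1, c2) :: q' :: rest').drop
              (List.takeWhile pvMatch ((c1, c2) :: q' :: rest')).length
              = List.dropWhile pvMatch (q' :: rest') := by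
            rw [← pvDropWhile_eq_drop]
            simp [List.dropWhile, pvMatch, hm]
          rcases hdw : List.dropWhile pvMatch (q' :: rest') with _ | ⟨q, d'⟩
          · rw [pvAFin]
            rw [hdrop, hdw, pvBLoop]
            rw [hrunlen]; push_cast
            have e0 : i1 + 1 + (k : Int) - i1 = (k : Int) + 1 := by ring
            simp only [e0]
          · rw [pvAFin]
            have hq : pvMatch q = false := pvDropWhile_head_false pvMatch _ q d' hdw
            have hlen : d'.length ≤ n := by
              have h1 : (List.dropWhile pvMatch (q' :: rest')).length ≤ (q' :: rest').length :=
                List.length_dropWhile_le _ _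
              rw [hdw] at h1; simp at h1 hps; omega
            rw [ih d' hlen _ _ _ (by positivity)]
            rw [hdrop, hdw, pvBLoop]
            have hqm : ((q.1 != '-') && (q.2 != '-')) = false := hq
            simp only [hqm, Bool.false_eq_true, if_false]
            rw [hrunlen]; push_cast
            rw [show i1 + 1 + (k : Int) = i1 + ((k : Int) + 1) from by ring,
              show i2 + 1 + (k : Int) = i2 + ((k : Int) + 1) from by ring]
            have e2 : i1 + ((k : Int) + 1) - i1 = (k : Int) + 1 := by ring
            simp [e2]
      · rw [pvALoop, pvBLoop]
        simp only [hm, Bool.false_eq_true, if_false, bne_self_eq_false, if_false]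
        have hlen : rest.length ≤ n := by simp at hps; omega
        apply ih rest hlen
        split <;> omega

-- ===== VERDICT (by name: the statement is the Claim_ definition above) =====
theorem compute_segment_matches_spec : Claim_equal_compute_segment_matches := by
  intro s1 s2 bss bqs bid _ _
  unfold Spec_compute_segment_matches compute_segment_matches compute_segment_matches_alt
  exact pvMain bss bqs bid _ _ (le_refl _) 0 0 [] (by omega)
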